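-- pv_equiv track=rewrite | github.com/ebilal/PSA | psa/curation/ngrams.py | extract_ngrams
-- ===== SOURCE A (Python) =====
-- STOPWORDS: frozenset[str] = frozenset(
--     {
--         "a",
--         "an",
--         "the",
--         "is",
--         "was",
--         "were",
--         "be",
--         "been",
--         "being",
--         "have",
--         "has",
--         "had",
--         "do",
--         "does",
--         "did",
--         "will",
--         "would",
--         "could",
--         "should",
--         "may",
--         "might",
--         "shall",
--         "can",
--         "i",
--         "you",
--         "he",
--         "she",
--         "it",
--         "we",
--         "they",
--         "me",
--         "him",
--         "her",
--         "us",
--         "them",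
--         "my",
--         "your",
--         "his",
--         "our",
--         "their",
--         "this",
--         "that",
--         "what",
--         "when",
--         "where",
--         "who",
--         "which",
--         "how",
--         "about",
--         "and",
--         "or",
--         "but",
--         "in",
--         "on",
--         "at",
--         "to",
--         "for",
--         "of",
--         "with",
--         "by",
--         "from",
--         "up",
--         "into",
--         "through",
--         "during",
--         "before",
--         "after",
--         "above",
--         "below",
--         "between",
--     }
-- )
--
-- def extract_ngrams(text: str, min_n: int = 3, max_n: int = 6) -> list[str]:
--     """Extract ngrams of length min_n..max_n from `text`, longer first.
--
--     A span is kept iff at least one of its words is NOT in STOPWORDS.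
--     The result is a list of space-separated lowercase ngrams; longer
--     patterns come first so downstream dedup-then-cap prefers them.
--     """
--     words = text.lower().split()
--     result: list[str] = []
--     for n in range(max_n, min_n - 1, -1):
--         for i in range(len(words) - n + 1):
--             gram = words[i : i + n]
--             if any(w not in STOPWORDS for w in gram):
--                 result.append(" ".join(gram))
--     return result
-- ===== SOURCE B (Python) =====
-- STOPWORDS: frozenset[str] = frozenset(
--     {
--         "a", "an", "the", "is", "was", "were", "be", "been", "being",
--         "have", "has", "had", "do", "does", "did", "will", "would",
--         "could", "should", "may", "might", "shall", "can", "i", "you",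
--         "he", "she", "it", "we", "they", "me", "him", "her", "us",
--         "them", "my", "your", "his", "our", "their", "this", "that",
--         "what", "when", "where", "who", "which", "how", "about", "and",
--         "or", "but", "in", "on", "at", "to", "for", "of", "with", "by",
--         "from", "up", "into", "through", "during", "before", "after",
--         "above", "below", "between",
--     }
-- )
--
--
-- def extract_ngrams(text: str, min_n: int = 3, max_n: int = 6) -> list[str]:
--     words = text.lower().split()
--     # prefix sums of non-stopword flags: pref[k] = #{j < k : words[j] not in STOPWORDS}
--     pref = [0]
--     running = 0
--     for w in words:
--         running += w not in STOPWORDS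
--         pref.append(running)
--     return [
--         " ".join(words[i : i + n])
--         for n in range(max_n, min_n - 1, -1)
--         for i in range(len(words) - n + 1)
--         if 0 < n and pref[i] < pref[i + n]
--     ]
-- ===== Notes on version B (the rewrite author's own statement) =====
-- stated objective: alternative
-- what changed: B precomputes a prefix-sum table of non-stopword counts once, so each span's kept-test becomes a single table comparison instead of A's any() scan over the span, and the output is built as one comprehension (flatMap of filtered joins) instead of nested append loops.
-- intended difference: When min_n < 0 the n-loop reaches negative span lengths, where A's words[i:i+n] wraps around via Python's negative slice stop and A appends spurious extra ngrams drawn from words[:-1]; B returns only the genuine positive-length ngrams, which is the intended value. — e.g. on extract_ngrams("x y", -1, 2): A returns ["x y", "x", "y", "x"], B returns ["x y", "x", "y"]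
import Mathlib
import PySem

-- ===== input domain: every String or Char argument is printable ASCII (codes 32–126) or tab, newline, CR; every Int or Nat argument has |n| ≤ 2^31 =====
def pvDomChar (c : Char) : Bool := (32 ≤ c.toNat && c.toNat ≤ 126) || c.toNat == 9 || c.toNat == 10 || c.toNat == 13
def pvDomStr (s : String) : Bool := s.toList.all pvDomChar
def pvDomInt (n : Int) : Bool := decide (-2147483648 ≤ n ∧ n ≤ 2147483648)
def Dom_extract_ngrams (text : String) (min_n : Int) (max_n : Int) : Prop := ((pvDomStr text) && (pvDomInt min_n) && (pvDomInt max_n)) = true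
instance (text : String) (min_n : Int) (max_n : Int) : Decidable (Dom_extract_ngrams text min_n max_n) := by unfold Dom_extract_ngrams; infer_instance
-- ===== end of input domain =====

-- B replaces A's per-span any() stopword scan by a prefix-sum table queried per span (and a
-- comprehension-style flatMap instead of append loops); outside D_ below the return values agree.

-- ===== PORT A =====
def pvSTOPWORDS : List String :=
  ["a", "an", "the", "is", "was", "were", "be", "been", "being",
   "have", "has", "had", "do", "does", "did", "will", "would",
   "could", "should", "may", "might", "shall", "can", "i", "you",
   "he", "she", "it", "we", "they", "me", "him", "her", "us",
   "them", "my", "your", "his", "our", "their", "this", "that",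
   "what", "when", "where", "who", "which", "how", "about", "and",
   "or", "but", "in", "on", "at", "to", "for", "of", "with", "by",
   "from", "up", "into", "through", "during", "before", "after",
   "above", "below", "between"]

def extract_ngrams (text : String) (min_n : Int) (max_n : Int) : List String :=
  let words := PySem.Str.split₀ (PySem.Str.lower text)
  (PySem.List.pyRange max_n (min_n - 1) (-1)).foldl
    (fun result n =>
      (PySem.List.pyRange 0 (PySem.List.len words - n + 1) 1).foldl
        (fun result i =>
          let gram := PySem.List.slice words (some i) (some (i + n))
          if gram.any (fun w => !(pvSTOPWORDS.contains w)) then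
            result ++ [PySem.Str.join " " gram]
          else result)
        result)
    []

-- ===== PORT B =====
def extract_ngrams_alt (text : String) (min_n : Int) (max_n : Int) : List String :=
  let words := PySem.Str.split₀ (PySem.Str.lower text)
  let pref := (words.foldl
      (fun (st : List Int × Int) w =>
        let r := st.2 + (if !(pvSTOPWORDS.contains w) then (1 : Int) else 0)
        (st.1 ++ [r], r))
      ([0], 0)).1
  (PySem.List.pyRange max_n (min_n - 1) (-1)).flatMap (fun n =>
    ((PySem.List.pyRange 0 (PySem.List.len words - n + 1) 1).filter (fun i =>
        decide (0 < n) && decide (PySem.List.pyGetD pref i 0 < PySem.List.pyGetD pref (i + n) 0))).map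
      (fun i => PySem.Str.join " " (PySem.List.slice words (some i) (some (i + n)))))

-- ===== PRECONDITION & SPEC =====
-- When min_n < 0 (so the n-loop reaches negative lengths), A's slice words[i:i+n] hits Python's
-- negative-slice-stop wraparound and A re-emits spurious extra ngrams drawn from words[:-1];
-- B returns only the genuine positive-length ngrams, which is the intended value.
def D_extract_ngrams (text : String) (min_n : Int) (max_n : Int) : Prop :=
  let words := PySem.Str.split₀ (PySem.Str.lower text)
  let k0 : Int := max 1 (-max_n)
  min_n ≤ -k0 ∧ k0 ≤ (words.length : Int) - 1 ∧
    words.dropLast.any (fun w => !(pvSTOPWORDS.contains w)) = true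
instance (text : String) (min_n : Int) (max_n : Int) : Decidable (D_extract_ngrams text min_n max_n) := by
  unfold D_extract_ngrams; infer_instance

def Spec_extract_ngrams (text : String) (min_n : Int) (max_n : Int) (out : List String) : Prop :=
  ¬ D_extract_ngrams text min_n max_n → out = extract_ngrams_alt text min_n max_n
instance (text : String) (min_n : Int) (max_n : Int) (out : List String) : Decidable (Spec_extract_ngrams text min_n max_n out) := by
  unfold Spec_extract_ngrams; infer_instance

def pvDiffWitness_extract_ngrams : String × Int × Int := ("x y", -1, 2)
def pvDiffWitnessOut_extract_ngrams : (List String) × (List String) :=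
  (["x y", "x", "y", "x"], ["x y", "x", "y"])

-- ===== CLAIM (what is proved, stated in full; the proofs are below) =====
def Claim_unchanged_extract_ngrams : Prop := ∀ (text : String) (min_n : Int) (max_n : Int), Dom_extract_ngrams text min_n max_n → Spec_extract_ngrams text min_n max_n (extract_ngrams text min_n max_n)
def Claim_changed_extract_ngrams : Prop := Dom_extract_ngrams (pvDiffWitness_extract_ngrams.1) (pvDiffWitness_extract_ngrams.2.1) (pvDiffWitness_extract_ngrams.2.2) ∧ D_extract_ngrams (pvDiffWitness_extract_ngrams.1) (pvDiffWitness_extract_ngrams.2.1) (pvDiffWitness_extract_ngrams.2.2) ∧ extract_ngrams (pvDiffWitness_extract_ngrams.1) (pvDiffWitness_extract_ngrams.2.1) (pvDiffWitness_extract_ngrams.2.2) = pvDiffWitnessOut_extract_ngrams.1 ∧ extract_ngrams_alt (pvDiffWitness_extract_ngrams.1) (pvDiffWitness_extract_ngrams.2.1) (pvDiffWitness_extract_ngrams.2.2) = pvDiffWitnessOut_extract_ngrams.2 ∧ pvDiffWitnessOut_extract_ngrams.1 ≠ pvDiffWitnessOut_extract_ngrams.2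
def Claim_exact_extract_ngrams : Prop := ∀ (text : String) (min_n : Int) (max_n : Int), Dom_extract_ngrams text min_n max_n → D_extract_ngrams text min_n max_n → extract_ngrams text min_n max_n ≠ extract_ngrams_alt text min_n max_n

-- ===== LEMMAS AND PROOFS =====
def pvKeep (w : String) : Bool := !(pvSTOPWORDS.contains w)

def pvPref (ws : List String) : List Int :=
  (ws.foldl
    (fun (st : List Int × Int) w =>
      let r := st.2 + (if !(pvSTOPWORDS.contains w) then (1 : Int) else 0)
      (st.1 ++ [r], r))
    ([0], 0)).1

def pvRowA (ws : List String) (n : Int) : List String :=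
  ((PySem.List.pyRange 0 (PySem.List.len ws - n + 1) 1).filter
      (fun i => (PySem.List.slice ws (some i) (some (i + n))).any pvKeep)).map
    (fun i => PySem.Str.join " " (PySem.List.slice ws (some i) (some (i + n))))

def pvRowB (ws : List String) (n : Int) : List String :=
  ((PySem.List.pyRange 0 (PySem.List.len ws - n + 1) 1).filter
      (fun i => decide (0 < n) &&
        decide (PySem.List.pyGetD (pvPref ws) i 0 < PySem.List.pyGetD (pvPref ws) (i + n) 0))).map
    (fun i => PySem.Str.join " " (PySem.List.slice ws (some i) (some (i + n))))

-- B's prefix fold builds the table of stopword-free counts over every prefix of `ws`.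
theorem pvFold_spec (ws : List String) :
    ws.foldl
      (fun (st : List Int × Int) w =>
        let r := st.2 + (if !(pvSTOPWORDS.contains w) then (1 : Int) else 0)
        (st.1 ++ [r], r))
      ([0], 0)
    = ((List.range (ws.length + 1)).map (fun j => ((ws.take j).countP pvKeep : Int)),
       (ws.countP pvKeep : Int)) := by
  induction ws using List.reverseRecOn with
  | nil => simp
  | append_singleton ws w ih =>
      rw [List.foldl_append, ih]
      simp only [List.foldl_cons, List.foldl_nil]
      have hcnt : (ws ++ [w]).countP pvKeep = ws.countP pvKeep + (if pvKeep w then 1 else 0) := by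
        simp [List.countP_append, List.countP_cons]
      simp only [Prod.mk.injEq]
      refine ⟨?_, ?_⟩
      · rw [List.length_append, List.length_singleton, List.range_succ (n := ws.length + 1)]
        rw [List.map_append]
        congr 1
        · apply List.map_congr_left
          intro j hj
          simp only [List.mem_range] at hj
          rw [List.take_append_of_le_length (by omega)]
        · simp only [List.map_cons, List.map_nil]
          rw [List.take_of_length_le (by simp)]
          rw [hcnt, pvKeep]
          push_cast
          split_ifs <;> simp
      · rw [hcnt, pvKeep]; push_cast; split_ifs <;> simp

theorem pvPref_getD (ws : List String) (j : ℕ) (hj : j ≤ ws.length) :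
    PySem.List.pyGetD (pvPref ws) (j : Int) 0 = ((ws.take j).countP pvKeep : Int) := by
  rw [pvPref, pvFold_spec]
  rw [PySem.List.pyGetD_natCast]
  rw [PySem.List.getD_map_range _ _ _ _ (by omega)]

-- A kept span of negative length n comes from Python's negative-stop wraparound: its words all
-- lie in ws[:-1] and -n ≤ len(ws) - 1.
theorem pvSlice_neg_any (ws : List String) (i n : Int) (hi : 0 ≤ i) (hn : n ≤ -1)
    (h : (PySem.List.slice ws (some i) (some (i + n))).any pvKeep = true) :
    ws.dropLast.any pvKeep = true ∧ (-n) ≤ (ws.length : Int) - 1 := by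
  unfold PySem.List.slice PySem.List.clampIdx at h
  simp only [show ¬ (i < 0) by omega, if_false] at h
  by_cases hb : i + n < 0
  · simp only [hb, if_true] at h
    by_cases hz : (ws.length : Int) + (i + n) < 0
    · simp only [hz, if_true] at h
      simp at h
    · simp only [hz, if_false] at h
      rw [List.any_eq_true] at h
      obtain ⟨x, hx, hkx⟩ := h
      have hne : 0 < ((ws.length : Int) + (i + n)).toNat - min i.toNat ws.length := by
        by_contra hc
        have hz0 : ((ws.length : Int) + (i + n)).toNat - min i.toNat ws.length = 0 := by omega
        rw [hz0, List.take_zero] at hx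
        simp at hx
      rw [← List.drop_take] at hx
      have hx2 : x ∈ List.take (((ws.length : Int) + (i + n)).toNat) ws := List.mem_of_mem_drop hx
      have hbL : (((ws.length : Int) + (i + n)).toNat) ≤ ws.length - 1 := by omega
      have hx3 : x ∈ ws.dropLast := by
        rw [List.dropLast_eq_take]
        have := List.take_take (i := ((ws.length : Int) + (i + n)).toNat) (j := ws.length - 1) (l := ws)
        rw [min_eq_left hbL] at this
        rw [← this] at hx2
        exact List.mem_of_mem_take hx2
      refine ⟨List.any_eq_true.mpr ⟨x, hx3, hkx⟩, ?_⟩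
      omega
  · -- i + n ≥ 0 while n ≤ -1 : stop ≤ start, empty slice
    simp only [hb, if_false] at h
    have : min (i + n).toNat ws.length - min i.toNat ws.length = 0 := by omega
    rw [this] at h
    simp at h

-- For a genuine span (n ≥ 1) A's any() scan equals B's prefix-table comparison.
theorem pvCondA_eq (ws : List String) (n' i' : ℕ) (hn : 1 ≤ n') (hinL : i' + n' ≤ ws.length) :
    (PySem.List.slice ws (some (i' : Int)) (some ((i' : Int) + (n' : Int)))).any pvKeep
      = decide (PySem.List.pyGetD (pvPref ws) (i' : Int) 0
          < PySem.List.pyGetD (pvPref ws) ((i' : Int) + (n' : Int)) 0) := by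
  rw [← Nat.cast_add]
  rw [PySem.List.slice_toNat _ (by omega) (by omega)]
  simp only [Int.toNat_natCast]
  rw [pvPref_getD _ _ (by omega), pvPref_getD _ _ hinL]
  rw [show i' + n' - i' = n' from by omega]
  rw [List.take_add, List.countP_append]
  rcases h : (List.take n' (List.drop i' ws)).any pvKeep with hf | ht
  · symm
    have hz : (List.take n' (List.drop i' ws)).countP pvKeep = 0 := by
      rw [List.countP_eq_zero]
      intro a ha
      have := List.any_eq_true.not.mp (by rw [h]; simp)
      push Not at this
      simpa using this a ha
    simp [hz]
  · symm
    rw [List.any_eq_true] at h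
    have hp : 0 < (List.take n' (List.drop i' ws)).countP pvKeep :=
      List.countP_pos_iff.mpr h
    simp
    omega

theorem pvA_eq (text : String) (min_n max_n : Int) :
    extract_ngrams text min_n max_n
      = (PySem.List.pyRange max_n (min_n - 1) (-1)).flatMap
          (pvRowA (PySem.Str.split₀ (PySem.Str.lower text))) := by
  unfold extract_ngrams
  simp only []
  set ws := PySem.Str.split₀ (PySem.Str.lower text) with hws
  have hinner : ∀ (n : Int) (acc : List String),
      (PySem.List.pyRange 0 (PySem.List.len ws - n + 1) 1).foldl
        (fun result i =>
          let gram := PySem.List.slice ws (some i) (some (i + n))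
          if gram.any (fun w => !(pvSTOPWORDS.contains w)) then
            result ++ [PySem.Str.join " " gram]
          else result)
        acc
      = acc ++ pvRowA ws n := by
    intro n acc
    exact PySem.List.foldl_append_if
      (fun i => (PySem.List.slice ws (some i) (some (i + n))).any pvKeep)
      (fun i => PySem.Str.join " " (PySem.List.slice ws (some i) (some (i + n)))) _ acc
  simp only [hinner]
  rw [PySem.List.foldl_append_eq_flatMap, List.nil_append]

theorem pvB_eq (text : String) (min_n max_n : Int) :
    extract_ngrams_alt text min_n max_n
      = (PySem.List.pyRange max_n (min_n - 1) (-1)).flatMap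
          (pvRowB (PySem.Str.split₀ (PySem.Str.lower text))) := rfl

theorem pvRow_pos (ws : List String) (n : Int) (hn : 1 ≤ n) : pvRowA ws n = pvRowB ws n := by
  unfold pvRowA pvRowB
  congr 1
  apply List.filter_congr
  intro i hi
  rw [PySem.List.mem_pyRange_one] at hi
  rw [PySem.List.len_eq] at hi
  have hi0 : i = ((i.toNat : ℕ) : Int) := by omega
  have hn0 : n = ((n.toNat : ℕ) : Int) := by omega
  rw [show decide (0 < n) = true by simp; omega, Bool.true_and]
  rw [hi0, hn0]
  exact pvCondA_eq ws n.toNat i.toNat (by omega) (by omega)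

theorem pvRowB_nonpos (ws : List String) (n : Int) (hn : n ≤ 0) : pvRowB ws n = [] := by
  unfold pvRowB
  rw [List.filter_eq_nil_iff.mpr (fun i _ => by simp [show ¬ (0 < n) by omega])]
  rfl

theorem pvRowA_zero (ws : List String) : pvRowA ws 0 = [] := by
  unfold pvRowA
  rw [List.filter_eq_nil_iff.mpr ?_]
  · rfl
  · intro i hi
    rw [PySem.List.mem_pyRange_one] at hi
    rw [PySem.List.slice_toNat _ hi.1 (by omega)]
    simp

-- The explicit value of a wrapped-around slice ws[i:i-k] for 0 ≤ i < k ≤ len ws.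
theorem pvSlice_neg_eq (ws : List String) (i k : Int) (h0 : 0 ≤ i) (hik : i < k)
    (hkL : k ≤ (ws.length : Int)) :
    PySem.List.slice ws (some i) (some (i - k))
      = List.take (((ws.length : Int) + i - k).toNat - i.toNat) (List.drop i.toNat ws) := by
  unfold PySem.List.slice PySem.List.clampIdx
  simp only [show ¬ (i < 0) by omega, if_false, show i - k < 0 by omega, if_true,
    show ¬ ((ws.length : Int) + (i - k) < 0) by omega, if_false]
  have h1 : min i.toNat ws.length = i.toNat := by omega
  have h2 : ((ws.length : Int) + (i - k)).toNat = ((ws.length : Int) + i - k).toNat := by omega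
  rw [h1, h2]

theorem pvMain (text : String) (min_n max_n : Int)
    (hD : ¬ (min_n ≤ -(max 1 (-max_n)) ∧ (max 1 (-max_n)) ≤ ((PySem.Str.split₀ (PySem.Str.lower text)).length : Int) - 1 ∧
      (PySem.Str.split₀ (PySem.Str.lower text)).dropLast.any (fun w => !(pvSTOPWORDS.contains w)) = true)) :
    extract_ngrams text min_n max_n = extract_ngrams_alt text min_n max_n := by
  rw [pvA_eq, pvB_eq]
  set ws := PySem.Str.split₀ (PySem.Str.lower text) with hws
  rw [List.flatMap_def, List.flatMap_def]
  apply congrArg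
  apply List.map_congr_left
  intro n hn
  rw [PySem.List.mem_pyRange_neg_one] at hn
  rcases lt_trichotomy n 0 with hneg | hzero | hpos
  · -- n ≤ -1 : both rows empty (A's by ¬D, B's by the 0 < n guard)
    rw [pvRowB_nonpos ws n (by omega)]
    unfold pvRowA
    rw [List.filter_eq_nil_iff.mpr ?_]
    · rfl
    · intro i hi
      rw [PySem.List.mem_pyRange_one] at hi
      simp only [Bool.not_eq_true]
      rcases hany : (PySem.List.slice ws (some i) (some (i + n))).any pvKeep with _ | htr
      · rfl
      · exfalso
        obtain ⟨h1, h2⟩ := pvSlice_neg_any ws i n hi.1 (by omega) hany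
        exact hD ⟨by omega, by omega, h1⟩
  · subst hzero
    rw [pvRowA_zero, pvRowB_nonpos ws 0 (by omega)]
  · exact pvRow_pos ws n hpos

theorem pvTight (text : String) (min_n max_n : Int)
    (hD1 : min_n ≤ -(max 1 (-max_n)))
    (hD2 : (max 1 (-max_n)) ≤ ((PySem.Str.split₀ (PySem.Str.lower text)).length : Int) - 1)
    (hD3 : (PySem.Str.split₀ (PySem.Str.lower text)).dropLast.any (fun w => !(pvSTOPWORDS.contains w)) = true) :
    extract_ngrams text min_n max_n ≠ extract_ngrams_alt text min_n max_n := by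
  rw [pvA_eq, pvB_eq]
  set ws := PySem.Str.split₀ (PySem.Str.lower text) with hws
  set k0 : Int := max 1 (-max_n) with hk0
  have hk1 : (1 : Int) ≤ k0 := le_max_left _ _
  have hk2 : -max_n ≤ k0 := le_max_right _ _
  intro heq
  have hlen := congrArg List.length heq
  rw [List.length_flatMap, List.length_flatMap] at hlen
  have hle : ∀ n ∈ PySem.List.pyRange max_n (min_n - 1) (-1),
      (pvRowB ws n).length ≤ (pvRowA ws n).length := by
    intro n _
    rcases le_or_gt n 0 with h | h
    · rw [pvRowB_nonpos ws n h]; simp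
    · rw [pvRow_pos ws n (by omega)]
  have hex : ∃ n ∈ PySem.List.pyRange max_n (min_n - 1) (-1),
      (pvRowB ws n).length < (pvRowA ws n).length := by
    refine ⟨-k0, ?_, ?_⟩
    · rw [PySem.List.mem_pyRange_neg_one]
      omega
    · rw [pvRowB_nonpos ws (-k0) (by omega)]
      -- pvRowA ws (-k0) is nonempty: find a kept wrapped span
      rw [List.any_eq_true] at hD3
      obtain ⟨x, hx, hkx⟩ := hD3
      rw [List.mem_iff_getElem] at hx
      obtain ⟨j, hj, hjx⟩ := hx
      rw [List.length_dropLast] at hj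
      have hLpos : 1 ≤ ws.length := by omega
      set i : Int := max 0 ((j : Int) + k0 + 1 - (ws.length : Int)) with hidef
      have hic := max_choice 0 ((j : Int) + k0 + 1 - (ws.length : Int))
      have hi0 : 0 ≤ i := le_max_left _ _
      have hi1 : (j : Int) + k0 + 1 - (ws.length : Int) ≤ i := le_max_right _ _
      have hij : i ≤ (j : Int) := by omega
      have hik : i < k0 := by omega
      have hcond : (PySem.List.slice ws (some i) (some (i + -k0))).any pvKeep = true := by
        rw [show i + -k0 = i - k0 from by ring]
        rw [pvSlice_neg_eq ws i k0 hi0 hik (by omega)]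
        rw [List.any_eq_true]
        refine ⟨x, ?_, hkx⟩
        rw [List.mem_iff_getElem]
        have hjlt : j - i.toNat < (((ws.length : Int) + i - k0).toNat - i.toNat) := by omega
        have hdl : j - i.toNat < (List.drop i.toNat ws).length := by
          rw [List.length_drop]; omega
        refine ⟨j - i.toNat, ?_, ?_⟩
        · rw [List.length_take]; omega
        · rw [List.getElem_take, List.getElem_drop]
          have hswap : ws[i.toNat + (j - i.toNat)]'(by omega) = ws[j]'(by omega) := by
            congr 1
            omega
          rw [hswap, ← hjx, List.getElem_dropLast]
      have hmem : (i : Int) ∈ PySem.List.pyRange 0 (PySem.List.len ws - -k0 + 1) 1 := by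
        rw [PySem.List.mem_pyRange_one, PySem.List.len_eq]
        omega
      unfold pvRowA
      rw [List.length_nil, List.length_map]
      rw [List.length_pos_iff]
      intro hfil
      rw [List.filter_eq_nil_iff] at hfil
      exact absurd hcond (by simpa using hfil i hmem)
  have := List.sum_lt_sum (fun n => (pvRowB ws n).length) (fun n => (pvRowA ws n).length) hle hex
  omega

-- ===== VERDICT (by name: the statement is the Claim_ definition above) =====
theorem extract_ngrams_spec : Claim_unchanged_extract_ngrams := by
  intro text min_n max_n _ hD
  apply pvMain
  intro hc
  exact hD hc

theorem extract_ngrams_changed : Claim_changed_extract_ngrams := by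
  unfold Claim_changed_extract_ngrams; decide

theorem extract_ngrams_tight : Claim_exact_extract_ngrams := by
  intro text min_n max_n _ hD
  obtain ⟨h1, h2, h3⟩ := hD
  exact pvTight text min_n max_n h1 h2 h3
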